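-- pv_equiv track=rewrite | github.com/intel/intel-application-migration-tool-for-openacc-to-openmp | src/migrate_openacc_2_openmp_tools.py | searchForEndOfDeclarationOrImplementation_C
-- ===== SOURCE A (Python) =====
-- def findClosingBrackets (line, pos, lines):
-- 	res = -1
-- 	nopenbrackets = 1
-- 	s = lines[line][pos+1:]
-- 	while nopenbrackets > 0:
-- 		# Check for closing bracket that matches this opening bracket
-- 		for i in range(0, len(s)):
-- 			if s[i] == '{':
-- 				nopenbrackets = nopenbrackets + 1
-- 			elif s[i] == '}':
-- 				nopenbrackets = nopenbrackets - 1
-- 				if nopenbrackets == 0: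
-- 					res = line
-- 					break
-- 		# Process next line if there are pending open brackets
-- 		if nopenbrackets > 0:
-- 			line = line + 1
-- 			s = lines[line]
-- 	return res
--
-- def searchForEndOfDeclarationOrImplementation_C (startlineno, lines):
-- 	endlineno = startlineno
--
-- 	l = lines[startlineno]
-- 	# Search for end of declaration (;) or begin of implementation ({) chars.
-- 	# If this is an implementation, then we have to identify where the
-- 	# implementation finishes
-- 	declaration_pos = l.find (";")
-- 	implementation_pos = l.find ("{")
--
-- 	if declaration_pos >= 0 and implementation_pos >= 0:
-- 		if declaration_pos > implementation_pos:
-- 			endlineno = findClosingBrackets (startlineno, implementation_pos, lines)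
-- 		else:
-- 			pass
-- 	elif declaration_pos >= 0 and implementation_pos < 0:
-- 		pass
-- 	elif declaration_pos < 0 and implementation_pos >= 0:
-- 		endlineno = findClosingBrackets (startlineno, implementation_pos, lines)
-- 	elif declaration_pos < 0 and implementation_pos < 0:
-- 		if startlineno+1 < len(lines):
-- 			return searchForEndOfDeclarationOrImplementation_C (startlineno+1, lines)
-- 		else:
-- 			pass
-- 	return endlineno
-- ===== SOURCE B (Python) =====
-- def _braceProfile(s):
-- 	# Aggregate a line into (lowest prefix brace balance, total brace balance).
-- 	low = tot = 0
-- 	for ch in s: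
-- 		if ch == '{':
-- 			tot += 1
-- 		elif ch == '}':
-- 			tot -= 1
-- 		if tot < low:
-- 			low = tot
-- 	return low, tot
--
-- def findClosingBrackets(line, pos, lines):
-- 	# Per-line aggregate matching: the closing brace lies in the current chunk
-- 	# exactly when its lowest prefix balance would drive the depth to zero.
-- 	depth = 1
-- 	s = lines[line][pos+1:]
-- 	while True:
-- 		low, tot = _braceProfile(s)
-- 		if low <= -depth:
-- 			return line
-- 		depth += tot
-- 		line += 1
-- 		s = lines[line]
--
-- def searchForEndOfDeclarationOrImplementation_C(startlineno, lines):
-- 	cur = startlineno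
-- 	while True:
-- 		l = lines[cur]
-- 		dp = l.find(";")
-- 		ip = l.find("{")
-- 		if ip >= 0 and (dp < 0 or ip < dp):
-- 			return findClosingBrackets(cur, ip, lines)
-- 		if dp >= 0:
-- 			return cur
-- 		if cur + 1 < len(lines):
-- 			cur += 1
-- 		else:
-- 			return cur
-- ===== Notes on version B (the rewrite author's own statement) =====
-- stated objective: alternative
-- what changed: The outer search replaces A's tail recursion with an explicit line-cursor loop with a merged branch condition, and the brace matcher replaces A's per-character open-bracket counter with early break by per-line (lowest prefix balance, total balance) aggregates computed in one fold and compared against the running depth.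
import Mathlib
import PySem

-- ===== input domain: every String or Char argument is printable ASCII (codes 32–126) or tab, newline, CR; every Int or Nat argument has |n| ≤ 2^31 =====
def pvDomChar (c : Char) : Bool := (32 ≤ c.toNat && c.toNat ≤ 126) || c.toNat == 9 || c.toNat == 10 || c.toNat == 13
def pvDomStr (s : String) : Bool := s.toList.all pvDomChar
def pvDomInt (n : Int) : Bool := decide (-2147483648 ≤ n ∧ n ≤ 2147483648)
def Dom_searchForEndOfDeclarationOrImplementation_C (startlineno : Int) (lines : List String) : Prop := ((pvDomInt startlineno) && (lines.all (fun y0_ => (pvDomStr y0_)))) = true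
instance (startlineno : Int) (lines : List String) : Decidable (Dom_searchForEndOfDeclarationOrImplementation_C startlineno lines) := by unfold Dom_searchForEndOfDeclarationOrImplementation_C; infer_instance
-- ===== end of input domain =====

-- B replaces A's tail recursion on the next line number by an explicit line-cursor loop and
-- replaces A's per-character open-bracket state machine by per-line (lowest prefix balance, total
-- balance) aggregates; objective: alternative decomposition, same cost.

-- ===== PORT A =====
-- the inner `for i in range(0, len(s))` of findClosingBrackets: walk the characters keeping
-- nopenbrackets; returns (final nopenbrackets, whether the loop broke with nopenbrackets == 0)
def pvScanA : Int → List Char → Int × Bool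
  | n, [] => (n, false)
  | n, c :: cs =>
    if c = '{' then pvScanA (n + 1) cs
    else if c = '}' then
      if n - 1 = 0 then (n - 1, true) else pvScanA (n - 1) cs
    else pvScanA n cs

-- the `while nopenbrackets > 0` loop of findClosingBrackets; `none` from pyGet? is Python's
-- IndexError on unbalanced brackets (unreachable under Pre_), the 0 returned there is arbitrary
def pvFCBLoopA (lines : List String) (n line : Int) (s : List Char) : Int :=
  match pvScanA n s with
  | (_, true) => line
  | (n', false) =>
    match h : PySem.List.pyGet? lines (line + 1) with
    | none => 0
    | some t => pvFCBLoopA lines n' (line + 1) t.toList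
termination_by (lines.length - line).toNat
decreasing_by
  by_contra hc
  have h2 : PySem.List.pyGet? lines (line + 1) = none := by
    rw [PySem.List.pyGet?_eq_none_iff, PySem.Raise.InRange]; omega
  simp [h] at h2

def pvFindClosingBracketsA (line pos : Int) (lines : List String) : Int :=
  match PySem.List.pyGet? lines line with
  | none => 0  -- IndexError (unreachable under Pre_)
  | some l => pvFCBLoopA lines 1 line (PySem.List.slice l.toList (some (pos + 1)) none)

def searchForEndOfDeclarationOrImplementation_C (startlineno : Int) (lines : List String) : Int :=
  match PySem.List.pyGet? lines startlineno with
  | none => 0  -- IndexError (unreachable under Pre_)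
  | some l =>
    let declaration_pos := PySem.Str.find l ";"
    let implementation_pos := PySem.Str.find l "{"
    if 0 ≤ declaration_pos ∧ 0 ≤ implementation_pos then
      if declaration_pos > implementation_pos then
        pvFindClosingBracketsA startlineno implementation_pos lines
      else startlineno
    else if 0 ≤ declaration_pos ∧ implementation_pos < 0 then startlineno
    else if declaration_pos < 0 ∧ 0 ≤ implementation_pos then
      pvFindClosingBracketsA startlineno implementation_pos lines
    else if startlineno + 1 < PySem.List.len lines then
      searchForEndOfDeclarationOrImplementation_C (startlineno + 1) lines
    else startlineno
termination_by (lines.length - startlineno).toNat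
decreasing_by
  rename_i hlt
  simp [PySem.List.len] at hlt
  omega

-- ===== PORT B =====
-- _braceProfile: one fold producing (lowest prefix brace balance, total brace balance)
def pvProfStep (lt : Int × Int) (ch : Char) : Int × Int :=
  let tot := if ch = '{' then lt.2 + 1 else if ch = '}' then lt.2 - 1 else lt.2
  (if tot < lt.1 then tot else lt.1, tot)

def pvBraceProfile (s : List Char) : Int × Int := s.foldl pvProfStep (0, 0)

-- findClosingBrackets of Source B: advance a line at a time comparing the aggregate against depth
def pvFCBLoopB (lines : List String) (depth line : Int) (s : List Char) : Int :=
  let lt := pvBraceProfile s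
  if lt.1 ≤ -depth then line
  else
    match h : PySem.List.pyGet? lines (line + 1) with
    | none => 0  -- IndexError (unreachable under Pre_)
    | some t => pvFCBLoopB lines (depth + lt.2) (line + 1) t.toList
termination_by (lines.length - line).toNat
decreasing_by
  by_contra hc
  have h2 : PySem.List.pyGet? lines (line + 1) = none := by
    rw [PySem.List.pyGet?_eq_none_iff, PySem.Raise.InRange]; omega
  simp [h] at h2

def pvFindClosingBracketsB (line pos : Int) (lines : List String) : Int :=
  match PySem.List.pyGet? lines line with
  | none => 0  -- IndexError (unreachable under Pre_)
  | some l => pvFCBLoopB lines 1 line (PySem.List.slice l.toList (some (pos + 1)) none)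

-- the `while True` cursor loop of Source B
def pvSearchB (lines : List String) (cur : Int) : Int :=
  match PySem.List.pyGet? lines cur with
  | none => 0  -- IndexError (unreachable under Pre_)
  | some l =>
    let dp := PySem.Str.find l ";"
    let ip := PySem.Str.find l "{"
    if 0 ≤ ip ∧ (dp < 0 ∨ ip < dp) then pvFindClosingBracketsB cur ip lines
    else if 0 ≤ dp then cur
    else if cur + 1 < PySem.List.len lines then pvSearchB lines (cur + 1)
    else cur
termination_by (lines.length - cur).toNat
decreasing_by
  rename_i hlt
  simp [PySem.List.len] at hlt
  omega

def searchForEndOfDeclarationOrImplementation_C_alt (startlineno : Int) (lines : List String) : Int :=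
  pvSearchB lines startlineno

-- ===== PRECONDITION & SPEC =====
-- Pre_-only helpers (independent of both ports): brace delta of a character, lowest prefix
-- balance and total balance of a character list, and the list of lines the brace search will
-- still read after line `cur` (Python's negative-index wraparound makes a negative cur re-read
-- the whole list once it crosses -1).
def pvPreDelta (c : Char) : Int := if c = '{' then 1 else if c = '}' then -1 else 0

def pvPreMinpref : List Char → Int
  | [] => 0
  | c :: cs => min 0 (pvPreDelta c + pvPreMinpref cs)

def pvPreRest (lines : List String) (cur : Int) : List String :=
  if cur < 0 then lines.drop ((lines.length : Int) + cur + 1).toNat ++ lines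
  else lines.drop (cur + 1).toNat

-- Pre_ excludes exactly the inputs where Python raises IndexError: a start line index outside
-- Python's (negative-index included) range, and implementations whose opening '{' is never
-- rebalanced by a matching '}' before the line scan runs off the end of `lines`.
def Pre_searchForEndOfDeclarationOrImplementation_C (startlineno : Int) (lines : List String) : Prop :=
  (-(lines.length : Int) ≤ startlineno ∧ startlineno < lines.length) ∧
  ((((List.range ((lines.length - startlineno).toNat)).map
       (fun k => startlineno + (k : Int))).find?
     (fun c =>
       decide (0 ≤ PySem.Str.find (PySem.List.pyGetD lines c "") ";") ||
       decide (0 ≤ PySem.Str.find (PySem.List.pyGetD lines c "") "{"))).all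
   (fun c =>
     let l := PySem.List.pyGetD lines c ""
     let dp := PySem.Str.find l ";"
     let ip := PySem.Str.find l "{"
     !(decide (0 ≤ ip) && (decide (dp < 0) || decide (ip < dp))) ||
       decide (pvPreMinpref (PySem.List.slice l.toList (some (ip + 1)) none ++
                             (pvPreRest lines c).flatMap String.toList) ≤ -1)) = true)

instance (startlineno : Int) (lines : List String) : Decidable (Pre_searchForEndOfDeclarationOrImplementation_C startlineno lines) := by unfold Pre_searchForEndOfDeclarationOrImplementation_C; infer_instance

def pvWitness_searchForEndOfDeclarationOrImplementation_C : Int × List String :=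
  (0, ["int f()", "{ x; }"])

def Spec_searchForEndOfDeclarationOrImplementation_C (startlineno : Int) (lines : List String) (out : Int) : Prop := out = searchForEndOfDeclarationOrImplementation_C_alt startlineno lines
instance (startlineno : Int) (lines : List String) (out : Int) : Decidable (Spec_searchForEndOfDeclarationOrImplementation_C startlineno lines out) := by unfold Spec_searchForEndOfDeclarationOrImplementation_C; infer_instance

-- ===== CLAIM (what is proved, stated in full; the proofs are below) =====
def Claim_equal_searchForEndOfDeclarationOrImplementation_C : Prop := ∀ (startlineno : Int) (lines : List String), Dom_searchForEndOfDeclarationOrImplementation_C startlineno lines → Pre_searchForEndOfDeclarationOrImplementation_C startlineno lines → Spec_searchForEndOfDeclarationOrImplementation_C startlineno lines (searchForEndOfDeclarationOrImplementation_C startlineno lines)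

-- ===== LEMMAS AND PROOFS =====

def pvPreTot (s : List Char) : Int := (s.map pvPreDelta).sum

lemma pvPreMinpref_nonpos (s : List Char) : pvPreMinpref s ≤ 0 := by
  cases s with
  | nil => simp [pvPreMinpref]
  | cons c cs => simp [pvPreMinpref]

lemma pvPreTot_cons (c : Char) (cs : List Char) :
    pvPreTot (c :: cs) = pvPreDelta c + pvPreTot cs := by
  simp [pvPreTot]

lemma pvPreMinpref_le_tot (s : List Char) : pvPreMinpref s ≤ pvPreTot s := by
  induction s with
  | nil => simp [pvPreMinpref, pvPreTot]
  | cons c cs ih => rw [pvPreTot_cons]; simp [pvPreMinpref]; right; omega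

-- A's character state machine computes exactly the (lowest prefix balance, total) aggregates
lemma pvPreMinpref_cons (c : Char) (cs : List Char) :
    pvPreMinpref (c :: cs) = min 0 (pvPreDelta c + pvPreMinpref cs) := rfl

lemma pvScanA_eq (s : List Char) : ∀ n : Int, 1 ≤ n →
    pvScanA n s = if pvPreMinpref s ≤ -n then (0, true) else (n + pvPreTot s, false) := by
  induction s with
  | nil =>
    intro n hn
    rw [pvScanA]
    rw [if_neg (by simp [pvPreMinpref]; omega)]
    simp [pvPreTot]
  | cons c cs ih =>
    intro n hn
    have hms := pvPreMinpref_nonpos cs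
    rw [pvPreMinpref_cons, pvPreTot_cons]
    by_cases hob : c = '{'
    · rw [pvScanA, if_pos hob, ih (n + 1) (by omega)]
      simp only [pvPreDelta, if_pos hob]
      split_ifs <;>
        first
          | rfl
          | (exfalso; omega)
          | (rw [Prod.mk.injEq]; exact ⟨by omega, rfl⟩)
    · by_cases hcb : c = '}'
      · rw [pvScanA, if_neg hob, if_pos hcb]
        simp only [pvPreDelta, if_neg hob, if_pos hcb]
        by_cases h1 : n - 1 = 0
        · rw [if_pos h1, if_pos (by omega)]
          rw [Prod.mk.injEq]; exact ⟨by omega, rfl⟩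
        · rw [if_neg h1, ih (n - 1) (by omega)]
          split_ifs <;>
            first
              | rfl
              | (exfalso; omega)
              | (rw [Prod.mk.injEq]; exact ⟨by omega, rfl⟩)
      · rw [pvScanA, if_neg hob, if_neg hcb, ih n hn]
        simp only [pvPreDelta, if_neg hob, if_neg hcb]
        split_ifs <;>
          first
            | rfl
            | (exfalso; omega)
            | (rw [Prod.mk.injEq]; exact ⟨by omega, rfl⟩)

-- B's fold computes the same aggregates
lemma pvBraceProfile_go (s : List Char) : ∀ low tot : Int, low ≤ tot →
    s.foldl pvProfStep (low, tot) = (min low (tot + pvPreMinpref s), tot + pvPreTot s) := by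
  induction s with
  | nil =>
    intro low tot h
    simp [pvPreMinpref, pvPreTot]
    omega
  | cons c cs ih =>
    intro low tot h
    have hms := pvPreMinpref_nonpos cs
    have htot : (if c = '{' then tot + 1 else if c = '}' then tot - 1 else tot)
        = tot + pvPreDelta c := by
      simp only [pvPreDelta]; split_ifs <;> omega
    simp only [List.foldl_cons, pvProfStep]
    rw [htot,
      ih (if tot + pvPreDelta c < low then tot + pvPreDelta c else low) (tot + pvPreDelta c)
        (by split_ifs <;> omega),
      pvPreMinpref_cons, pvPreTot_cons, Prod.mk.injEq]
    have hmin : (if tot + pvPreDelta c < low then tot + pvPreDelta c else low)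
        = min low (tot + pvPreDelta c) := by split_ifs <;> omega
    rw [hmin]
    constructor <;> omega

lemma pvBraceProfile_eq (s : List Char) : pvBraceProfile s = (pvPreMinpref s, pvPreTot s) := by
  rw [pvBraceProfile, pvBraceProfile_go s 0 0 le_rfl]
  have := pvPreMinpref_nonpos s
  simp; omega

-- the two bracket-matching loops agree (the IndexError branch returns 0 on both sides)
lemma pvFCBLoop_eq (lines : List String) : ∀ (k : Nat) (line n : Int) (s : List Char),
    (lines.length - line).toNat = k → 1 ≤ n →
    pvFCBLoopA lines n line s = pvFCBLoopB lines n line s := by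
  intro k
  induction k using Nat.strong_induction_on with
  | _ k ih =>
    intro line n s hk hn
    rw [pvFCBLoopA.eq_def, pvFCBLoopB.eq_def, pvBraceProfile_eq, pvScanA_eq s n hn]
    by_cases hhit : pvPreMinpref s ≤ -n
    · simp [hhit]
    · simp only [if_neg hhit]
      have hn' : 1 ≤ n + pvPreTot s := by
        have := pvPreMinpref_le_tot s
        omega
      cases hget : PySem.List.pyGet? lines (line + 1) with
      | none => simp
      | some t =>
        have hlt : line + 1 < (lines.length : Int) := by
          by_contra hc
          have h2 : PySem.List.pyGet? lines (line + 1) = none := by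
            rw [PySem.List.pyGet?_eq_none_iff, PySem.Raise.InRange]; omega
          simp [hget] at h2
        exact ih ((lines.length - (line + 1)).toNat) (by omega) (line + 1) _ t.toList rfl hn'

lemma pvFCB_eq (line pos : Int) (lines : List String) :
    pvFindClosingBracketsA line pos lines = pvFindClosingBracketsB line pos lines := by
  rw [pvFindClosingBracketsA, pvFindClosingBracketsB]
  cases hget : PySem.List.pyGet? lines line with
  | none => rfl
  | some l => exact pvFCBLoop_eq lines _ line 1 _ rfl le_rfl

-- the outer loops agree line by line (A's tail recursion vs B's cursor loop)
lemma pvSearch_eq (lines : List String) : ∀ (k : Nat) (cur : Int),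
    (lines.length - cur).toNat = k →
    searchForEndOfDeclarationOrImplementation_C cur lines = pvSearchB lines cur := by
  intro k
  induction k using Nat.strong_induction_on with
  | _ k ih =>
    intro cur hk
    rw [searchForEndOfDeclarationOrImplementation_C.eq_def, pvSearchB.eq_def]
    cases hget : PySem.List.pyGet? lines cur with
    | none => rfl
    | some l =>
      simp only []
      set dp := PySem.Str.find l ";" with hdp
      set ip := PySem.Str.find l "{" with hip
      by_cases h1 : 0 ≤ dp
      · by_cases h2 : 0 ≤ ip
        · by_cases h3 : dp > ip
          · rw [if_pos ⟨h1, h2⟩, if_pos h3, if_pos ⟨h2, Or.inr h3⟩, pvFCB_eq]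
          · rw [if_pos ⟨h1, h2⟩, if_neg h3,
              if_neg (show ¬(0 ≤ ip ∧ (dp < 0 ∨ ip < dp)) by omega), if_pos h1]
        · rw [if_neg (show ¬(0 ≤ dp ∧ 0 ≤ ip) by omega), if_pos ⟨h1, by omega⟩,
            if_neg (show ¬(0 ≤ ip ∧ (dp < 0 ∨ ip < dp)) by omega), if_pos h1]
      · by_cases h2 : 0 ≤ ip
        · rw [if_neg (show ¬(0 ≤ dp ∧ 0 ≤ ip) by omega),
            if_neg (show ¬(0 ≤ dp ∧ ip < 0) by omega), if_pos ⟨by omega, h2⟩,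
            if_pos ⟨h2, Or.inl (by omega)⟩, pvFCB_eq]
        · rw [if_neg (show ¬(0 ≤ dp ∧ 0 ≤ ip) by omega),
            if_neg (show ¬(0 ≤ dp ∧ ip < 0) by omega),
            if_neg (show ¬(dp < 0 ∧ 0 ≤ ip) by omega),
            if_neg (show ¬(0 ≤ ip ∧ (dp < 0 ∨ ip < dp)) by omega),
            if_neg (show ¬(0 ≤ dp) from h1)]
          by_cases h3 : cur + 1 < PySem.List.len lines
          · rw [if_pos h3, if_pos h3]
            have h3' : cur + 1 < (lines.length : Int) := by
              simpa [PySem.List.len] using h3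
            exact ih ((lines.length - (cur + 1)).toNat) (by omega) (cur + 1) rfl
          · rw [if_neg h3, if_neg h3]

-- ===== VERDICT (by name: the statement is the Claim_ definition above) =====
theorem searchForEndOfDeclarationOrImplementation_C_spec : Claim_equal_searchForEndOfDeclarationOrImplementation_C := by
  intro startlineno lines _ _
  show _ = searchForEndOfDeclarationOrImplementation_C_alt startlineno lines
  rw [searchForEndOfDeclarationOrImplementation_C_alt]
  exact pvSearch_eq lines _ startlineno rfl
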